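-- pv_equiv track=rewrite | github.com/thaumocracy/abyss | python/grades.py | grade_students
-- ===== SOURCE A (Python) =====
-- def grade_students(scores):
--     # Scores 91 - 100: Grade = "Outstanding"
--     # Scores 81 - 90: Grade = "Exceeds Expectations"
--     # Scores 71 - 80: Grade = "Acceptable"
--     # Scores 70 or lower: Grade = "Fail"
--     grades = {}
--     for name in scores:
--         if scores[name] >= 91:
--             grades[name] = "Outstanding"
--         elif scores[name] >= 81 and scores[name] <= 90:
--             grades[name] = "Exceeds Expectations"
--         elif scores[name] >= 71 and scores[name] <= 80:
--             grades[name] = "Acceptable"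
--         else:
--             grades[name] = "Fail"
--
--     return grades
-- ===== SOURCE B (Python) =====
-- def grade_students(scores):
--     # Threshold table + count-of-cuts-passed index instead of an if/elif cascade.
--     cuts = [71, 81, 91]
--     labels = ["Fail", "Acceptable", "Exceeds Expectations", "Outstanding"]
--     return {name: labels[sum(1 for c in cuts if score >= c)]
--             for name, score in scores.items()}
-- ===== Notes on version B (the rewrite author's own statement) =====
-- stated objective: idiomatic
-- what changed: Replaced the if/elif comparison cascade with a threshold table: the grade label is looked up in a labels list indexed by how many of the three cut-off scores the score reaches, built as a dict comprehension.
import Mathlib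
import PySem

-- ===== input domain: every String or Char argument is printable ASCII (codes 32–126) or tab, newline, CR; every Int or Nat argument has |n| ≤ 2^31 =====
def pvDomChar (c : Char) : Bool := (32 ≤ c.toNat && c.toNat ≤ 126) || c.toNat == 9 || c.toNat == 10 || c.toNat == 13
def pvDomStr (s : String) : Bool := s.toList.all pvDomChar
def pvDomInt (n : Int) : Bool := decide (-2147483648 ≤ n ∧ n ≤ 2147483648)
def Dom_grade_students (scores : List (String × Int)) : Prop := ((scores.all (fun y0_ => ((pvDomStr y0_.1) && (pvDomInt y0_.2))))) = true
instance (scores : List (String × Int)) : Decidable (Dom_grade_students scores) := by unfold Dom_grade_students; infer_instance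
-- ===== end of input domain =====

-- B replaces A's if/elif cascade by a labels table indexed by the number of cut-offs reached (idiomatic; same cost).

-- ===== PORT A =====
-- 'scores' is a Python dict; iteration 'for name in scores' runs over its keys, 'scores[name]'
-- always hits (name comes from the keys), so getD never falls back to its default.
def grade_students (scores : List (String × Int)) : List (String × String) :=
  ((PySem.Dict.ofList scores).keys.foldl (fun grades name =>
      if (PySem.Dict.ofList scores).getD name 0 ≥ 91 then grades.insert name "Outstanding"
      else if (PySem.Dict.ofList scores).getD name 0 ≥ 81 ∧ (PySem.Dict.ofList scores).getD name 0 ≤ 90 then grades.insert name "Exceeds Expectations"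
      else if (PySem.Dict.ofList scores).getD name 0 ≥ 71 ∧ (PySem.Dict.ofList scores).getD name 0 ≤ 80 then grades.insert name "Acceptable"
      else grades.insert name "Fail")
    PySem.Dict.empty).items

-- ===== PORT B =====
def pvCuts : List Int := [71, 81, 91]
def pvLabels : List String := ["Fail", "Acceptable", "Exceeds Expectations", "Outstanding"]
-- The dict comprehension runs over .items() of a dict, whose keys are distinct, so it is a map;
-- 'sum(1 for c in cuts if score >= c)' is the count of cuts ≤ score, always in 0..3,
-- so labels[...] is in-range indexing (getD's default is never used).
def grade_students_alt (scores : List (String × Int)) : List (String × String) :=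
  (PySem.Dict.ofList scores).items.map (fun p =>
    (p.1, pvLabels.getD (pvCuts.countP (fun c => decide (c ≤ p.2))) ""))

-- ===== PRECONDITION & SPEC =====
def Spec_grade_students (scores : List (String × Int)) (out : List (String × String)) : Prop := out = grade_students_alt scores
instance (scores : List (String × Int)) (out : List (String × String)) : Decidable (Spec_grade_students scores out) := by unfold Spec_grade_students; infer_instance

-- ===== CLAIM (what is proved, stated in full; the proofs are below) =====
def Claim_equal_grade_students : Prop := ∀ (scores : List (String × Int)), Dom_grade_students scores → Spec_grade_students scores (grade_students scores)

-- ===== LEMMAS AND PROOFS =====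

-- the two per-score label computations agree
theorem pvLabel_eq (s : Int) :
    (if s ≥ 91 then "Outstanding"
     else if s ≥ 81 ∧ s ≤ 90 then "Exceeds Expectations"
     else if s ≥ 71 ∧ s ≤ 80 then "Acceptable"
     else "Fail")
    = pvLabels.getD (pvCuts.countP (fun c => decide (c ≤ s))) "" := by
  by_cases h1 : (91:Int) ≤ s
  · simp [pvCuts, pvLabels, ge_iff_le, h1, show (81:Int) ≤ s by omega, show (71:Int) ≤ s by omega]
  · by_cases h2 : (81:Int) ≤ s
    · simp [pvCuts, pvLabels, ge_iff_le, h1, h2, show (71:Int) ≤ s by omega, show s ≤ 90 by omega]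
    · by_cases h3 : (71:Int) ≤ s
      · simp [pvCuts, pvLabels, ge_iff_le, h1, h2, h3, show s ≤ 80 by omega]
      · simp [pvCuts, pvLabels, ge_iff_le, h1, h2, h3]

-- ===== VERDICT (by name: the statement is the Claim_ definition above) =====
theorem grade_students_spec : Claim_equal_grade_students := by
  intro scores _
  unfold Spec_grade_students grade_students grade_students_alt
  have hnd : (PySem.Dict.ofList scores).keys.Nodup := PySem.Dict.nodup_keys_ofList scores
  have hfun : (fun (grades : PySem.Dict String String) name =>
      if (PySem.Dict.ofList scores).getD name 0 ≥ 91 then grades.insert name "Outstanding"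
      else if (PySem.Dict.ofList scores).getD name 0 ≥ 81 ∧ (PySem.Dict.ofList scores).getD name 0 ≤ 90 then grades.insert name "Exceeds Expectations"
      else if (PySem.Dict.ofList scores).getD name 0 ≥ 71 ∧ (PySem.Dict.ofList scores).getD name 0 ≤ 80 then grades.insert name "Acceptable"
      else grades.insert name "Fail")
      = (fun (grades : PySem.Dict String String) name => grades.insert name
          (if (PySem.Dict.ofList scores).getD name 0 ≥ 91 then "Outstanding"
           else if (PySem.Dict.ofList scores).getD name 0 ≥ 81 ∧ (PySem.Dict.ofList scores).getD name 0 ≤ 90 then "Exceeds Expectations"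
           else if (PySem.Dict.ofList scores).getD name 0 ≥ 71 ∧ (PySem.Dict.ofList scores).getD name 0 ≤ 80 then "Acceptable"
           else "Fail")) := by
    funext g n; split_ifs <;> rfl
  rw [hfun]
  refine (PySem.Dict.items_foldl_insert_fresh (PySem.Dict.ofList scores).keys (fun n => n) _
      PySem.Dict.empty (fun a _ => PySem.Dict.contains_empty a) (by simpa using hnd)).trans ?_
  rw [PySem.Dict.items_eq_map_keys (PySem.Dict.ofList scores) hnd 0, List.map_map]
  simp only [Function.comp_def]
  exact (List.nil_append _).trans (List.map_congr_left (fun n _ => by rw [pvLabel_eq]))
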